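-- pv_equiv track=rewrite | github.com/AmjadAlqahtani90/Spring2025 | Cryptography/coding-Assignment-1/try1.py | try_key
-- ===== SOURCE A (Python) =====
-- def xor_arr(arr, k):
--     return bytes([b ^ k for b in arr])
--
-- def try_key(ct_stream, candidate_key):
--     candidate_pt = xor_arr(ct_stream, candidate_key)
--
--     for b in candidate_pt:
--         if not (b == 0x20 or  # space
--                 b == 0x2C or  # ,
--                 b == 0x2E or  # .
--                 (0x41 <= b <= 0x5A) or  # A-Z
--                 (0x61 <= b <= 0x7A)):  # a-z
--             return False
--     return True
-- ===== SOURCE B (Python) =====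
-- def try_key(ct_stream, candidate_key):
--     valid_pt = b' ,.ABCDEFGHIJKLMNOPQRSTUVWXYZabcdefghijklmnopqrstuvwxyz'
--     allowed_ct = {p ^ candidate_key for p in valid_pt}
--     return set(ct_stream) <= allowed_ct
-- ===== Notes on version B (the rewrite author's own statement) =====
-- stated objective: idiomatic
-- what changed: B never XOR-decrypts the stream and has no per-byte scan: it deduplicates the ciphertext into a set and tests that set for inclusion in the precomputed set of acceptable ciphertext bytes (the valid plaintext alphabet XORed with the key), instead of building the decrypted bytes object and range-checking each byte with a fail-fast loop.
import Mathlib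
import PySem

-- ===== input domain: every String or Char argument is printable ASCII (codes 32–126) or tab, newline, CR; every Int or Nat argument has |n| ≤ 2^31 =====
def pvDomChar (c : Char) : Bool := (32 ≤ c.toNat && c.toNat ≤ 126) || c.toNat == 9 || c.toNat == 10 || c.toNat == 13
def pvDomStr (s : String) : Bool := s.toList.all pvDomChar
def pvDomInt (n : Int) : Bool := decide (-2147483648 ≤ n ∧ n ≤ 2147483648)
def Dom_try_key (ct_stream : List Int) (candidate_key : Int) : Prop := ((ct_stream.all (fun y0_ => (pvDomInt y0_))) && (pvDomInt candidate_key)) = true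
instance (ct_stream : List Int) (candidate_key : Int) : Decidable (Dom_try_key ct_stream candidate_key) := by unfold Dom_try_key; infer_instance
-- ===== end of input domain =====

-- B deduplicates the ciphertext into a set and tests it for inclusion in the precomputed
-- set of acceptable ciphertext bytes, never XOR-decrypting the stream (objective: idiomatic;
-- return value only, no mutation).

-- ===== PORT A =====
-- bytes([b ^ k for b in arr]); exact under Pre_try_key (outside it Python raises ValueError)
def xor_arr (arr : List Int) (k : Int) : List Int := arr.map (fun b => PySem.Int.bxor b k)

-- the 'for b in candidate_pt: if not (…): return False / return True' loop
def tryKeyLoopA : List Int → Bool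
  | [] => true
  | b :: rest =>
    if !(b == 0x20 || b == 0x2C || b == 0x2E ||
         (decide (0x41 ≤ b) && decide (b ≤ 0x5A)) ||
         (decide (0x61 ≤ b) && decide (b ≤ 0x7A))) then
      false
    else
      tryKeyLoopA rest

def try_key (ct_stream : List Int) (candidate_key : Int) : Bool :=
  tryKeyLoopA (xor_arr ct_stream candidate_key)

-- ===== PORT B =====
-- bytes literal b' ,.ABCDEFGHIJKLMNOPQRSTUVWXYZabcdefghijklmnopqrstuvwxyz' as its byte values
def validPt : List Int :=
  [0x20, 0x2C, 0x2E,
   0x41, 0x42, 0x43, 0x44, 0x45, 0x46, 0x47, 0x48, 0x49, 0x4A, 0x4B, 0x4C, 0x4D,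
   0x4E, 0x4F, 0x50, 0x51, 0x52, 0x53, 0x54, 0x55, 0x56, 0x57, 0x58, 0x59, 0x5A,
   0x61, 0x62, 0x63, 0x64, 0x65, 0x66, 0x67, 0x68, 0x69, 0x6A, 0x6B, 0x6C, 0x6D,
   0x6E, 0x6F, 0x70, 0x71, 0x72, 0x73, 0x74, 0x75, 0x76, 0x77, 0x78, 0x79, 0x7A]

-- {p ^ candidate_key for p in valid_pt}: consumed only by subset test, so order-independent
def allowedCt (candidate_key : Int) : PySem.Set Int :=
  PySem.Set.ofList (validPt.map (fun p => PySem.Int.bxor p candidate_key))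

-- set(ct_stream) <= allowed_ct
def try_key_alt (ct_stream : List Int) (candidate_key : Int) : Bool :=
  PySem.Set.issubset (PySem.Set.ofList ct_stream) (allowedCt candidate_key)

-- ===== PRECONDITION & SPEC =====
-- Pre_ excludes exactly the inputs where A's bytes() constructor raises ValueError:
-- some ciphertext byte XOR key falls outside 0..255.
def Pre_try_key (ct_stream : List Int) (candidate_key : Int) : Prop :=
  ∀ b ∈ ct_stream, 0 ≤ PySem.Int.bxor b candidate_key ∧ PySem.Int.bxor b candidate_key < 256
instance (ct_stream : List Int) (candidate_key : Int) : Decidable (Pre_try_key ct_stream candidate_key) := by unfold Pre_try_key; infer_instance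
def pvWitness_try_key : List Int × Int := ([72, 105, 33], 1)

def Spec_try_key (ct_stream : List Int) (candidate_key : Int) (out : Bool) : Prop := out = try_key_alt ct_stream candidate_key
instance (ct_stream : List Int) (candidate_key : Int) (out : Bool) : Decidable (Spec_try_key ct_stream candidate_key out) := by unfold Spec_try_key; infer_instance

-- ===== CLAIM (what is proved, stated in full; the proofs are below) =====
def Claim_equal_try_key : Prop := ∀ (ct_stream : List Int) (candidate_key : Int), Dom_try_key ct_stream candidate_key → Pre_try_key ct_stream candidate_key → Spec_try_key ct_stream candidate_key (try_key ct_stream candidate_key)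

-- ===== LEMMAS AND PROOFS =====

theorem bxor_cancel (a b : Int) : PySem.Int.bxor (PySem.Int.bxor a b) b = a := by
  rcases (show 0 ≤ a ∨ a < 0 by omega) with ha | ha <;> rcases (show 0 ≤ b ∨ b < 0 by omega) with hb | hb
  · have h1 : PySem.Int.bxor a b = ((a.toNat ^^^ b.toNat : Nat) : Int) := by
      rw [PySem.Int.bxor, if_pos ha, if_pos hb]
    rw [h1, PySem.Int.bxor, if_pos (Int.natCast_nonneg _), if_pos hb]
    simp [Int.toNat_of_nonneg ha]
  · have h1 : PySem.Int.bxor a b = -((a.toNat ^^^ (-b - 1).toNat : Nat) : Int) - 1 := by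
      rw [PySem.Int.bxor, if_pos ha, if_neg (by omega)]
    rw [h1, PySem.Int.bxor, if_neg (by omega), if_neg (by omega)]
    simp [Int.toNat_of_nonneg ha]
  · have h1 : PySem.Int.bxor a b = -(((-a - 1).toNat ^^^ b.toNat : Nat) : Int) - 1 := by
      rw [PySem.Int.bxor, if_neg (by omega), if_pos hb]
    rw [h1, PySem.Int.bxor, if_neg (by omega), if_pos hb]
    have : (-(-(((-a - 1).toNat ^^^ b.toNat : Nat) : Int) - 1) - 1).toNat = (-a - 1).toNat ^^^ b.toNat := by omega
    rw [this]
    simp; omega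
  · have h1 : PySem.Int.bxor a b = (((-a - 1).toNat ^^^ (-b - 1).toNat : Nat) : Int) := by
      rw [PySem.Int.bxor, if_neg (by omega), if_neg (by omega)]
    rw [h1, PySem.Int.bxor, if_pos (Int.natCast_nonneg _), if_neg (by omega)]
    simp; omega

theorem mem_validPt (b : Int) :
    b ∈ validPt ↔ (b = 0x20 ∨ b = 0x2C ∨ b = 0x2E ∨ (0x41 ≤ b ∧ b ≤ 0x5A) ∨ (0x61 ≤ b ∧ b ≤ 0x7A)) := by
  unfold validPt
  simp only [List.mem_cons, List.not_mem_nil, or_false]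
  constructor <;> intro h <;> omega

theorem mem_allowedCt (c k : Int) :
    c ∈ allowedCt k ↔ PySem.Int.bxor c k ∈ validPt := by
  unfold allowedCt
  rw [PySem.Set.mem_ofList, List.mem_map]
  constructor
  · rintro ⟨p, hp, rfl⟩
    rwa [bxor_cancel]
  · intro h
    exact ⟨PySem.Int.bxor c k, h, bxor_cancel c k⟩

theorem loop_eq (l : List Int) (k : Int) :
    tryKeyLoopA (xor_arr l k) = decide (∀ c ∈ l, c ∈ allowedCt k) := by
  induction l with
  | nil => rfl
  | cons b rest ih =>
    simp only [xor_arr, List.map] at *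
    rw [tryKeyLoopA, ih]
    have hC : (PySem.Int.bxor b k == 0x20 || PySem.Int.bxor b k == 0x2C || PySem.Int.bxor b k == 0x2E ||
          (decide (0x41 ≤ PySem.Int.bxor b k) && decide (PySem.Int.bxor b k ≤ 0x5A)) ||
          (decide (0x61 ≤ PySem.Int.bxor b k) && decide (PySem.Int.bxor b k ≤ 0x7A))) =
        decide (b ∈ allowedCt k) := by
      rw [Bool.eq_iff_iff]
      rw [decide_eq_true_iff, mem_allowedCt, mem_validPt]
      simp
      tauto
    rw [hC]
    cases hd : decide (b ∈ allowedCt k) <;> simp_all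

theorem alt_eq_all (l : List Int) (k : Int) :
    try_key_alt l k = decide (∀ c ∈ l, c ∈ allowedCt k) := by
  unfold try_key_alt
  rw [Bool.eq_iff_iff, PySem.Set.issubset_iff]
  simp only [decide_eq_true_iff, PySem.Set.mem_ofList]

-- ===== VERDICT (by name: the statement is the Claim_ definition above) =====
theorem try_key_spec : Claim_equal_try_key := by
  intro l k _ _
  unfold Spec_try_key try_key
  rw [loop_eq, alt_eq_all]
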